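-- pv_equiv track=rewrite | github.com/madhav06/Coding-Interviews | InterviewBit_Problems/arrays/Partitions_In_Arrays.py | solve
-- ===== SOURCE A (Python) =====
-- def solve(A, B):
--     x = sum(B)
--     if x%3 !=0:
--         return 0
--     cur_sum = 0
--     count  = 0
--     total_count = 0
--     x = x//3
--     count = 0
--     if x == 0:
--         for i in range(A):
--             cur_sum+= B[i]
--             if cur_sum == x:
--                 count+=1
--                 total_count += max(0,count-2)
--         return total_count
--     for i in range(A):
--         cur_sum += B[i]
--         if cur_sum == x:
--             count+=1
--         if cur_sum == 2*x and i!=0: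
--             total_count+= count
--     return total_count
-- ===== SOURCE B (Python) =====
-- from itertools import accumulate
-- from bisect import bisect_left
--
-- def solve(A, B):
--     total = sum(B)
--     if total % 3 != 0:
--         return 0
--     t = total // 3
--     prefix = list(accumulate(B[:A] if A > 0 else []))
--     pos_t = [i for i, p in enumerate(prefix) if p == t]
--     if t == 0:
--         m = len(pos_t)
--         return (m - 1) * (m - 2) // 2 if m >= 2 else 0
--     pos_2t = [i for i, p in enumerate(prefix) if p == 2 * t]
--     return sum(bisect_left(pos_t, j) for j in pos_2t if j != 0)
-- ===== Notes on version B (the rewrite author's own statement) =====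
-- stated objective: alternative
-- what changed: B replaces A's single fused counter-carrying pass by staged passes: it materializes the prefix list, extracts the t- and 2t-boundary index lists with comprehensions, answers t==0 by the closed form (m-1)*(m-2)//2 over the count of zero boundaries, and answers t!=0 by summing bisect_left counts of t-boundaries before each nonzero 2t-boundary.
import Mathlib
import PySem

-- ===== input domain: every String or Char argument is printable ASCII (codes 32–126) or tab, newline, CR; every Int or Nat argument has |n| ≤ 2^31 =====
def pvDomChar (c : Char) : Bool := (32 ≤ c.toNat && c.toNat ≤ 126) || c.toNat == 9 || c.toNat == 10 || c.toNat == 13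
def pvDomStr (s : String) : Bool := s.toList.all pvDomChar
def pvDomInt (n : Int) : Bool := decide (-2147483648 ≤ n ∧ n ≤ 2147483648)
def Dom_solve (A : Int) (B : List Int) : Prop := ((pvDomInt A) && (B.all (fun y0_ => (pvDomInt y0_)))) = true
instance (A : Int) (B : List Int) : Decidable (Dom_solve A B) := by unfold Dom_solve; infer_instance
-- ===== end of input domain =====

-- B stages the work differently: it materializes the prefix list, extracts the t- and
-- 2t-boundary index lists, answers t==0 by the closed form (m-1)(m-2)//2 and t!=0 by summing
-- bisect_left counts of t-boundaries before each nonzero 2t-boundary (objective: alternative).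


-- ===== PORT A =====
def solve (A : Int) (B : List Int) : Int :=
  let x := B.sum
  if PySem.Int.mod x 3 ≠ 0 then 0
  else
    let x := PySem.Int.floordiv x 3
    if x = 0 then
      ((PySem.List.pyRange 0 A 1).foldl
        (fun (s : Int × Int × Int) (i : Int) =>
          (s.1 + PySem.List.pyGetD B i 0,   -- B[i]; IndexError (i ≥ len) excluded by Pre_solve
           if s.1 + PySem.List.pyGetD B i 0 = x then
             (s.2.1 + 1, s.2.2 + max 0 (s.2.1 + 1 - 2))
           else s.2))
        (0, (0, 0))).2.2
    else
      ((PySem.List.pyRange 0 A 1).foldl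
        (fun (s : Int × Int × Int) (i : Int) =>
          (s.1 + PySem.List.pyGetD B i 0,
           (if s.1 + PySem.List.pyGetD B i 0 = x then s.2.1 + 1 else s.2.1,
            if s.1 + PySem.List.pyGetD B i 0 = 2 * x ∧ i ≠ 0 then
              s.2.2 + (if s.1 + PySem.List.pyGetD B i 0 = x then s.2.1 + 1 else s.2.1)
            else s.2.2)))
        (0, (0, 0))).2.2

-- ===== PORT B =====
def solve_alt (A : Int) (B : List Int) : Int :=
  let total := B.sum
  if PySem.Int.mod total 3 ≠ 0 then 0
  else
    let t := PySem.Int.floordiv total 3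
    -- list(accumulate(B[:A] if A > 0 else [])) : prefix sums = tail of scanl
    let pre := ((if 0 < A then PySem.List.slice B none (some A) else []).scanl (· + ·) 0).tail
    -- pos_t = [i for i, p in enumerate(prefix) if p == t]
    let posT := ((PySem.List.enumerate pre 0).filter (fun p => decide (p.2 = t))).map Prod.fst
    if t = 0 then
      let m : Int := (posT.length : Int)
      if 2 ≤ m then PySem.Int.floordiv ((m - 1) * (m - 2)) 2 else 0
    else
      let pos2 := ((PySem.List.enumerate pre 0).filter (fun p => decide (p.2 = 2 * t))).map Prod.fst
      -- bisect_left(pos_t, j): pos_t is ascending, so the insertion point is exactly the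
      -- number of entries < j; ported as countP (· < j), exact here on every input
      ((pos2.filter (fun j => decide (j ≠ 0))).map
        (fun j => ((posT.countP (fun v => decide (v < j)) : Nat) : Int))).sum

-- ===== PRECONDITION & SPEC =====
-- A raises IndexError exactly when A > len(B) and sum(B) % 3 == 0 (its loop walks i = 0..A-1).
def Pre_solve (A : Int) (B : List Int) : Prop :=
  A ≤ (B.length : Int) ∨ PySem.Int.mod B.sum 3 ≠ 0
instance (A : Int) (B : List Int) : Decidable (Pre_solve A B) := by unfold Pre_solve; infer_instance

def pvWitness_solve : Int × List Int := (3, [1, -1, 0])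

def Spec_solve (A : Int) (B : List Int) (out : Int) : Prop := out = solve_alt A B
instance (A : Int) (B : List Int) (out : Int) : Decidable (Spec_solve A B out) := by unfold Spec_solve; infer_instance

-- ===== CLAIM (what is proved, stated in full; the proofs are below) =====
def Claim_equal_solve : Prop := ∀ (A : Int) (B : List Int), Dom_solve A B → Pre_solve A B → Spec_solve A B (solve A B)

-- ===== LEMMAS AND PROOFS =====

-- prefix sums of l starting from accumulator c
def psums (c : Int) : List Int → List Int
  | [] => []
  | v :: l => (c + v) :: psums (c + v) l

lemma scanl_eq_cons_psums : ∀ (l : List Int) (c : Int), l.scanl (· + ·) c = c :: psums c l := by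
  intro l
  induction l with
  | nil => intro c; simp [psums]
  | cons v r ih => intro c; rw [List.scanl_cons, psums, ih]

-- 'for i in range(k, k+len(l)): f(i, B[i])' over a window l of B = fold over enumerate l k
lemma foldl_pyRange_enum {σ : Type} (f : σ → Int → Int → σ) (B : List Int) :
    ∀ (l : List Int) (k : Nat) (s : σ), l = (B.drop k).take l.length →
    (PySem.List.pyRange (k : Int) ((k : Int) + (l.length : Int)) 1).foldl
      (fun s i => f s i (PySem.List.pyGetD B i 0)) s
    = (PySem.List.enumerate l (k : Int)).foldl (fun s p => f s p.1 p.2) s := by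
  intro l
  induction l with
  | nil =>
    intro k s _
    rw [PySem.List.pyRange_one_eq_nil (by simp)]
    simp [PySem.List.enumerate]
  | cons v r ih =>
    intro k s hl
    have hdrop : B.drop k = v :: (B.drop (k + 1)) := by
      cases hB : B.drop k with
      | nil => rw [hB] at hl; simp at hl
      | cons w tl =>
        rw [hB] at hl
        simp [List.take_succ_cons] at hl
        have htl : tl = B.drop (k + 1) := by
          rw [← List.tail_drop, hB]
          rfl
        rw [hl.1, htl]
    have hget : PySem.List.pyGetD B (k : Int) 0 = v := by
      rw [PySem.List.pyGetD_natCast]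
      have hk : B[k]? = some v := by
        have h0 : (B.drop k)[0]? = B[k + 0]? := List.getElem?_drop ..
        rw [hdrop] at h0
        simpa using h0.symm
      simp [List.getD, hk]
    have hr : r = (B.drop (k + 1)).take r.length := by
      have h1 : (B.drop k).take (r.length + 1) = v :: r := by
        simpa using hl.symm
      rw [hdrop] at h1
      simpa [List.take_succ_cons] using h1.symm
    have hst : ((k : Int) + 1) = ((k + 1 : Nat) : Int) := by push_cast; ring
    have hen : (k : Int) + (((v :: r).length : Nat) : Int)
        = ((k + 1 : Nat) : Int) + ((r.length : Nat) : Int) := by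
      simp only [List.length_cons]; push_cast; ring
    rw [PySem.List.pyRange_one_cons (by simp only [List.length_cons]; push_cast; omega)]
    rw [List.foldl_cons, hget, hen, hst]
    rw [ih (k + 1) (f s (k : Int) v) hr]
    rw [PySem.List.enumerate_cons, List.foldl_cons, hst]

-- specialisation to 'for i in range(A)' with A = len(l), l a prefix of B
lemma foldl_pyRange_enum' {σ : Type} (f : σ → Int → Int → σ) (B l : List Int) (A : Int) (s : σ)
    (hA : A = (l.length : Int)) (hl : l = B.take l.length) :
    (PySem.List.pyRange 0 A 1).foldl (fun s i => f s i (PySem.List.pyGetD B i 0)) s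
    = (PySem.List.enumerate l 0).foldl (fun s p => f s p.1 p.2) s := by
  subst hA
  have h := foldl_pyRange_enum f B l 0 s (by simpa using hl)
  simpa using h

-- threading the running sum: a fold reading (index, value) with state (cur, t) equals the
-- plain fold over (index, prefix-sum) pairs
lemma foldl_enum_psums {σ : Type} (g : σ → Int → Int → σ) :
    ∀ (l : List Int) (k c : Int) (s : σ),
    ((PySem.List.enumerate l k).foldl
      (fun (st : Int × σ) (p : Int × Int) => (st.1 + p.2, g st.2 p.1 (st.1 + p.2))) (c, s)).2
    = (PySem.List.enumerate (psums c l) k).foldl (fun s p => g s p.1 p.2) s := by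
  intro l
  induction l with
  | nil => intro k c s; simp [psums, PySem.List.enumerate]
  | cons v r ih =>
    intro k c s
    simp only [psums, PySem.List.enumerate_cons, List.foldl_cons]
    exact ih (k + 1) (c + v) (g s k (c + v))

-- a fold ignoring the indices of an enumerate
lemma foldl_enum_snd {σ : Type} (g : σ → Int → σ) :
    ∀ (l : List Int) (k : Int) (s : σ),
    (PySem.List.enumerate l k).foldl (fun s (p : Int × Int) => g s p.2) s = l.foldl g s := by
  intro l
  induction l with
  | nil => intro k s; simp [PySem.List.enumerate]
  | cons v r ih => intro k s; simp [PySem.List.enumerate_cons, List.foldl_cons, ih]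

-- closed form for A's x == 0 accumulation
def Fcomb (m : Int) : Int := if 2 ≤ m then ((m - 1) * (m - 2)) / 2 else 0

lemma Fcomb_step (c : Int) (h : 0 ≤ c) : Fcomb (c + 1) = Fcomb c + max 0 (c - 1) := by
  unfold Fcomb
  by_cases h2 : 2 ≤ c
  · have e1 : (c + 1 - 1) * (c + 1 - 2) = (c - 1) * (c - 2) + (c - 1) * 2 := by ring
    rw [if_pos (by omega), if_pos h2, e1, Int.add_mul_ediv_right _ _ (by norm_num),
      max_eq_right (by omega)]
  · have hc : c = 0 ∨ c = 1 := by omega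
    rcases hc with rfl | rfl <;> decide

def count0 (l : List Int) : Int := ((l.filter (fun v => decide (v = 0))).length : Int)

lemma g0_fold : ∀ (l : List Int) (cnt tot : Int), 0 ≤ cnt →
    (l.foldl (fun (t : Int × Int) (c : Int) =>
        if c = 0 then (t.1 + 1, t.2 + max 0 (t.1 + 1 - 2)) else t) (cnt, tot)).2
    = tot + Fcomb (cnt + count0 l) - Fcomb cnt := by
  intro l
  induction l with
  | nil => intro cnt tot _; simp [count0]
  | cons v r ih =>
    intro cnt tot hc
    by_cases hv : v = 0
    · simp only [List.foldl_cons, if_pos hv]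
      rw [ih (cnt + 1) _ (by omega)]
      have hcnt : count0 (v :: r) = count0 r + 1 := by simp [count0, hv]
      rw [hcnt, Fcomb_step cnt hc]
      have : cnt + 1 + count0 r = cnt + (count0 r + 1) := by ring
      rw [this]; ring
    · simp only [List.foldl_cons, if_neg hv]
      rw [ih cnt tot hc]
      have : count0 (v :: r) = count0 r := by simp [count0, hv]
      rw [this]

-- pair counting for the x ≠ 0 branch: A's fused pass computes 'cross'
def cnt2 (x : Int) (e : List (Int × Int)) : Int :=
  ((e.filter (fun p => decide (p.2 = 2 * x ∧ p.1 ≠ 0))).length : Int)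

def cross (x : Int) : List (Int × Int) → Int
  | [] => 0
  | p :: r => (if p.2 = x then cnt2 x r else 0) + cross x r

lemma cnt2_cons (x : Int) (p : Int × Int) (r : List (Int × Int)) :
    cnt2 x (p :: r) = (if p.2 = 2 * x ∧ p.1 ≠ 0 then 1 else 0) + cnt2 x r := by
  by_cases h : p.2 = 2 * x ∧ p.1 ≠ 0 <;> simp [cnt2, h]; omega

lemma gA_fold (x : Int) (hx : x ≠ 0) :
    ∀ (e : List (Int × Int)) (cnt tot : Int),
    (e.foldl (fun (t : Int × Int) (p : Int × Int) =>
        (if p.2 = x then t.1 + 1 else t.1,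
         if p.2 = 2 * x ∧ p.1 ≠ 0 then t.2 + (if p.2 = x then t.1 + 1 else t.1) else t.2))
      (cnt, tot)).2
    = tot + cnt * cnt2 x e + cross x e := by
  intro e
  induction e with
  | nil => intro cnt tot; simp [cnt2, cross]
  | cons p r ih =>
    intro cnt tot
    rw [List.foldl_cons]
    by_cases h2 : p.2 = 2 * x ∧ p.1 ≠ 0
    · have hnx : ¬ p.2 = x := by rintro rfl; exact hx (by linarith [h2.1])
      simp only [if_pos h2, if_neg hnx]
      rw [ih]
      rw [cross, cnt2_cons, if_pos h2, if_neg hnx]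
      ring
    · by_cases h1 : p.2 = x
      · simp only [if_pos h1, if_neg h2]
        rw [ih]
        rw [cross, cnt2_cons, if_pos h1, if_neg h2]
        ring
      · simp only [if_neg h1, if_neg h2]
        rw [ih]
        rw [cross, cnt2_cons, if_neg h1, if_neg h2]
        ring

-- B-side: boundary-position lists and the bisect pair count
def posL (a : Int) (e : List (Int × Int)) : List Int :=
  (e.filter (fun p => decide (p.2 = a))).map Prod.fst

def bpairs (x : Int) (e : List (Int × Int)) : Int :=
  (((posL (2 * x) e).filter (fun j => decide (j ≠ 0))).map
    (fun j => ((posL x e).countP (fun v => decide (v < j)) : Int))).sum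

lemma mem_posL_ge (a : Int) (l : List Int) (k : Int) :
    ∀ j ∈ posL a (PySem.List.enumerate l k), k ≤ j := by
  intro j hj
  unfold posL at hj
  rcases List.mem_map.1 hj with ⟨p, hp, rfl⟩
  rcases (PySem.List.mem_enumerate_iff l k p).1 (List.mem_of_mem_filter hp) with ⟨m, _, rfl⟩
  have : k ≤ k + (m : Int) := by omega
  simpa using this

lemma posL_length_eq (a : Int) : ∀ (l : List Int) (k : Int),
    ((posL a (PySem.List.enumerate l k)).length : Int)
      = ((l.filter (fun v => decide (v = a))).length : Int) := by
  intro l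
  induction l with
  | nil => intro k; simp [posL, PySem.List.enumerate_nil]
  | cons v r ih =>
    intro k
    rw [PySem.List.enumerate_cons]
    unfold posL
    rw [List.filter_cons, List.filter_cons]
    by_cases hv : v = a
    · rw [if_pos (by simp [hv]), if_pos (by simp [hv]), List.map_cons, List.length_cons,
        List.length_cons]
      have := ih (k + 1)
      unfold posL at this
      push_cast at this ⊢
      omega
    · rw [if_neg (by simp [hv]), if_neg (by simp [hv])]
      exact ih (k + 1)

lemma cnt2_eq_len (x : Int) (l : List Int) (k : Int) (hk : 0 ≤ k) :
    cnt2 x (PySem.List.enumerate l (k + 1)) = ((posL (2 * x) (PySem.List.enumerate l (k + 1))).length : Int) := by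
  have h : List.filter (fun p => decide (p.2 = 2 * x ∧ p.1 ≠ 0)) (PySem.List.enumerate l (k + 1))
      = List.filter (fun p => decide (p.2 = 2 * x)) (PySem.List.enumerate l (k + 1)) := by
    apply List.filter_congr
    intro p hp
    rcases (PySem.List.mem_enumerate_iff l (k + 1) p).1 hp with ⟨m, _, rfl⟩
    have h1 : (k + 1 + (m : Int)) ≠ 0 := by omega
    simp [h1]
  unfold cnt2 posL
  rw [h, List.length_map]

lemma filter_ne0_posL (a : Int) (l : List Int) (k : Int) (hk : 0 ≤ k) :
    (posL a (PySem.List.enumerate l (k + 1))).filter (fun j => decide (j ≠ 0))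
      = posL a (PySem.List.enumerate l (k + 1)) := by
  apply List.filter_eq_self.2
  intro j hj
  have := mem_posL_ge a l (k + 1) j hj
  simp
  omega

lemma cross_eq_bpairs (x : Int) (hx : x ≠ 0) :
    ∀ (l : List Int) (k : Int), 0 ≤ k →
    cross x (PySem.List.enumerate l k) = bpairs x (PySem.List.enumerate l k) := by
  intro l
  induction l with
  | nil => intro k _; simp [PySem.List.enumerate_nil, cross, bpairs, posL]
  | cons v r ih =>
    intro k hk
    rw [PySem.List.enumerate_cons]
    have hge := mem_posL_ge x r (k + 1)
    have hge2 := mem_posL_ge (2 * x) r (k + 1)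
    by_cases h1 : v = x
    · have h2 : ¬ v = 2 * x := by rintro rfl; exact hx (by linarith)
      have hposT : posL x ((k, v) :: PySem.List.enumerate r (k + 1))
          = k :: posL x (PySem.List.enumerate r (k + 1)) := by
        simp [posL, List.filter_cons, h1]
      have hpos2 : posL (2 * x) ((k, v) :: PySem.List.enumerate r (k + 1))
          = posL (2 * x) (PySem.List.enumerate r (k + 1)) := by
        simp [posL, List.filter_cons, h2]
      rw [cross, if_pos h1, ih (k + 1) (by omega)]
      unfold bpairs
      rw [hposT, hpos2, filter_ne0_posL _ _ _ hk]
      have hmap : (posL (2 * x) (PySem.List.enumerate r (k + 1))).map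
            (fun j => (((k :: posL x (PySem.List.enumerate r (k + 1))).countP
              (fun v => decide (v < j)) : Nat) : Int))
          = (posL (2 * x) (PySem.List.enumerate r (k + 1))).map
            (fun j => (((posL x (PySem.List.enumerate r (k + 1))).countP
              (fun v => decide (v < j)) : Nat) : Int) + 1) := by
        apply List.map_congr_left
        intro j hj
        have hkj : k < j := by have := hge2 j hj; omega
        rw [List.countP_cons]
        simp [hkj]
      rw [hmap, PySem.List.sum_map_add_int, PySem.List.sum_map_const_int]
      rw [cnt2_eq_len x r k hk]
      ring
    · by_cases h2 : v = 2 * x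
      · have hposT : posL x ((k, v) :: PySem.List.enumerate r (k + 1))
            = posL x (PySem.List.enumerate r (k + 1)) := by
          simp [posL, List.filter_cons, h1]
        have hpos2 : posL (2 * x) ((k, v) :: PySem.List.enumerate r (k + 1))
            = k :: posL (2 * x) (PySem.List.enumerate r (k + 1)) := by
          simp [posL, List.filter_cons, h2]
        rw [cross, if_neg h1, ih (k + 1) (by omega)]
        unfold bpairs
        rw [hposT, hpos2, List.filter_cons]
        by_cases hk0 : k = 0
        · rw [if_neg (by simp [hk0]), zero_add]
        · rw [if_pos (by simp [hk0]), List.map_cons, List.sum_cons]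
          have hcnt0 : (((posL x (PySem.List.enumerate r (k + 1))).countP
              (fun v => decide (v < k)) : Nat) : Int) = 0 := by
            have h0 : (posL x (PySem.List.enumerate r (k + 1))).countP
                (fun v => decide (v < k)) = 0 := by
              apply List.countP_eq_zero.2
              intro j hj
              have hj1 := hge j hj
              simp
              omega
            rw [h0]
            rfl
          rw [hcnt0, zero_add]
      · have hposT : posL x ((k, v) :: PySem.List.enumerate r (k + 1))
            = posL x (PySem.List.enumerate r (k + 1)) := by
          simp [posL, List.filter_cons, h1]
        have hpos2 : posL (2 * x) ((k, v) :: PySem.List.enumerate r (k + 1))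
            = posL (2 * x) (PySem.List.enumerate r (k + 1)) := by
          simp [posL, List.filter_cons, h2]
        rw [cross, if_neg h1, ih (k + 1) (by omega)]
        unfold bpairs
        rw [hposT, hpos2, zero_add]

-- ===== VERDICT (by name: the statement is the Claim_ definition above) =====
theorem solve_spec : Claim_equal_solve := by
  intro A B _ hpre
  unfold Spec_solve
  by_cases hm : PySem.Int.mod B.sum 3 ≠ 0
  · unfold solve solve_alt
    simp only [if_pos hm]
  · have hm0 : PySem.Int.mod B.sum 3 = 0 := not_not.mp hm
    have hAlen : A ≤ (B.length : Int) := by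
      rcases hpre with h | h
      · exact h
      · exact absurd hm0 h
    unfold solve solve_alt
    simp only [if_neg hm]
    set x := PySem.Int.floordiv B.sum 3 with hxdef
    by_cases hApos : 0 < A
    case neg =>
      have hrange : PySem.List.pyRange 0 A 1 = [] := PySem.List.pyRange_one_eq_nil (by omega)
      have hpre0 : ((if 0 < A then PySem.List.slice B none (some A) else []).scanl (· + ·) 0).tail = [] := by
        rw [if_neg hApos]
        simp
      rw [hrange, hpre0]
      by_cases hx0 : x = 0
      · simp [hx0, posL, PySem.List.enumerate_nil]
      · simp [hx0, posL, PySem.List.enumerate_nil]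
    case pos =>
      set n := A.toNat with hndef
      have hnA : (n : Int) = A := Int.toNat_of_nonneg (by omega)
      have hnle : n ≤ B.length := by omega
      set L := B.take n with hLdef
      have hLlen : L.length = n := by simp [hLdef, List.length_take]; omega
      have hslice : (if 0 < A then PySem.List.slice B none (some A) else []) = L := by
        rw [if_pos hApos,
          show PySem.List.slice B none (some A) = B.take A.toNat from PySem.List.slice_to B (show (0:Int) ≤ A by omega)]
      have hpreL : ((if 0 < A then PySem.List.slice B none (some A) else []).scanl (· + ·) 0).tail = psums 0 L := by
        rw [hslice, scanl_eq_cons_psums]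
        rfl
      rw [hpreL]
      have hcond : L = B.take L.length := by rw [hLlen]
      have hAeq : A = (L.length : Int) := by rw [hLlen, hnA]
      by_cases hx0 : x = 0
      · simp only [if_pos hx0]
        rw [hx0]
        have e1 := foldl_pyRange_enum' (fun (s : Int × Int × Int) (i v : Int) =>
            (s.1 + v, if s.1 + v = 0 then (s.2.1 + 1, s.2.2 + max 0 (s.2.1 + 1 - 2)) else s.2))
          B L A ((0 : Int), ((0 : Int), (0 : Int))) hAeq hcond
        have e2 := foldl_enum_psums (σ := Int × Int)
          (fun (t : Int × Int) (_ : Int) (c : Int) =>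
            if c = 0 then (t.1 + 1, t.2 + max 0 (t.1 + 1 - 2)) else t) L 0 0 ((0 : Int), (0 : Int))
        have e3 := foldl_enum_snd (σ := Int × Int)
          (fun (t : Int × Int) (c : Int) =>
            if c = 0 then (t.1 + 1, t.2 + max 0 (t.1 + 1 - 2)) else t) (psums 0 L) 0 ((0 : Int), (0 : Int))
        have e4 := g0_fold (psums 0 L) 0 0 le_rfl
        have eFin : (0 : Int) + Fcomb (0 + count0 (psums 0 L)) - Fcomb 0
            = Fcomb (count0 (psums 0 L)) := by
          norm_num [Fcomb]
        have eLen : ((((PySem.List.enumerate (psums 0 L) 0).filter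
              (fun p => decide (p.2 = 0))).map Prod.fst).length : Int)
            = count0 (psums 0 L) := by
          have := posL_length_eq 0 (psums 0 L) 0
          simpa [posL, count0] using this
        have eB : (if 2 ≤ ((((PySem.List.enumerate (psums 0 L) 0).filter
              (fun p => decide (p.2 = 0))).map Prod.fst).length : Int) then
              PySem.Int.floordiv
                ((((((PySem.List.enumerate (psums 0 L) 0).filter
                  (fun p => decide (p.2 = 0))).map Prod.fst).length : Int) - 1) *
                 (((((PySem.List.enumerate (psums 0 L) 0).filter
                  (fun p => decide (p.2 = 0))).map Prod.fst).length : Int) - 2)) 2 else 0)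
            = Fcomb (count0 (psums 0 L)) := by
          rw [eLen]
          unfold Fcomb
          split_ifs with h
          · rw [PySem.Int.floordiv_eq_ediv_of_pos (by norm_num)]
          · rfl
        exact (((congrArg (fun z : Int × Int × Int => z.2.2) e1).trans
          ((congrArg (fun z : Int × Int => z.2) e2).trans
            ((congrArg (fun z : Int × Int => z.2) e3).trans (e4.trans eFin)))).trans eB.symm)
      · simp only [if_neg hx0]
        have e1 := foldl_pyRange_enum' (fun (s : Int × Int × Int) (i v : Int) =>
            (s.1 + v,
             (if s.1 + v = x then s.2.1 + 1 else s.2.1,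
              if s.1 + v = 2 * x ∧ i ≠ 0 then
                s.2.2 + (if s.1 + v = x then s.2.1 + 1 else s.2.1)
              else s.2.2)))
          B L A ((0 : Int), ((0 : Int), (0 : Int))) hAeq hcond
        have e2 := foldl_enum_psums (σ := Int × Int)
          (fun (t : Int × Int) (i : Int) (c : Int) =>
            (if c = x then t.1 + 1 else t.1,
             if c = 2 * x ∧ i ≠ 0 then t.2 + (if c = x then t.1 + 1 else t.1) else t.2))
          L 0 0 ((0 : Int), (0 : Int))
        have e4 : ((PySem.List.enumerate (psums 0 L) 0).foldl
            (fun (t : Int × Int) (p : Int × Int) =>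
              (if p.2 = x then t.1 + 1 else t.1,
               if p.2 = 2 * x ∧ p.1 ≠ 0 then t.2 + (if p.2 = x then t.1 + 1 else t.1) else t.2))
            ((0 : Int), (0 : Int))).2 = cross x (PySem.List.enumerate (psums 0 L) 0) := by
          rw [gA_fold x hx0]
          ring
        have eB : cross x (PySem.List.enumerate (psums 0 L) 0)
            = bpairs x (PySem.List.enumerate (psums 0 L) 0) :=
          cross_eq_bpairs x hx0 (psums 0 L) 0 le_rfl
        exact ((congrArg (fun z : Int × Int × Int => z.2.2) e1).trans
          ((congrArg (fun z : Int × Int => z.2) e2).trans e4)).trans (eB.trans rfl)
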